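-- pv_equiv track=rewrite | github.com/thekoc11/ShannonEntropy | new.py | dictByBlock
-- ===== SOURCE A (Python) =====
-- alphabet = [' ']
--
-- def incrementBlockSize(c):
--     retArray = []
--     for i in range(len(alphabet)):
--         retArray.append(c + alphabet[i])
--     return retArray
--
-- def dictByBlock(blockSize):
--     sampleSpaceArray = []
--     for j in range(len(alphabet)):
--         sampleSpaceArray.append(alphabet[j])
--     while len(list(sampleSpaceArray[len(sampleSpaceArray) - 1])) < blockSize:
--         for i in range(len(sampleSpaceArray)):
--             sampleSpaceArray[i] = incrementBlockSize(sampleSpaceArray[i])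
--         temp = []
--         for i in range(len(sampleSpaceArray)):
--             for j in range(len(sampleSpaceArray[i])):
--                 temp.append(sampleSpaceArray[i][j])
--         sampleSpaceArray = temp
--     retDict = {' ': 0}
--     for i in range(len(sampleSpaceArray)):
--         retDict[sampleSpaceArray[i]] = 0
--     return retDict
-- ===== SOURCE B (Python) =====
-- def dictByBlock(blockSize):
--     # Closed form: the single-space alphabet only ever yields one key, of final
--     # length max(1, blockSize); the dict literal collapses when the length is 1.
--     L = max(1, blockSize)
--     key = ' '
--     for _ in range(L - 1):
--         key += ' '
--     return {' ': 0, key: 0}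
-- ===== Notes on version B (the rewrite author's own statement) =====
-- stated objective: faster
-- what changed: Replaces the array-of-strings growing passes (each pass rebuilds the list and re-copies the strings) and the final dict-filling loop with a closed-form key length max(1, blockSize) and a single string accumulation.
import Mathlib
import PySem

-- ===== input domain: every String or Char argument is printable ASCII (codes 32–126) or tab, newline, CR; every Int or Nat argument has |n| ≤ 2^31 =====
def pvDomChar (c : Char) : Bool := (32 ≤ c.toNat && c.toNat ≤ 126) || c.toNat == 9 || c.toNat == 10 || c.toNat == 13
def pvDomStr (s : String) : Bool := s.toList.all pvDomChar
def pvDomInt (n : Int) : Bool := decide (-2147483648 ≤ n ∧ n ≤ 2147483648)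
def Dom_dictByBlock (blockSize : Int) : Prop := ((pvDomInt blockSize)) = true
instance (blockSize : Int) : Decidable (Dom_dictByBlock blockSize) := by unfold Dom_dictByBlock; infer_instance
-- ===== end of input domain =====

-- B replaces A's iterative string-growing while loop by the closed-form single key ' ' * max(1, blockSize) (objective: faster).

-- ===== PORT A =====
def pvAlphabet : List String := [" "]

def incrementBlockSize (c : String) : List String :=
  pvAlphabet.foldl (fun r a => r ++ [c ++ a]) []

-- the body of one while-loop pass: map incrementBlockSize over the array, then flatten into temp
def pvPass (xs : List String) : List String :=
  ((xs.map incrementBlockSize).foldl (fun t l => t ++ l) [])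

-- sampleSpaceArray[len(sampleSpaceArray)-1] (list is never empty on reachable states)
def pvLastLen (xs : List String) : Nat := (xs.getLastD "").toList.length

theorem pvFoldlApp {α : Type} (ls : List (List α)) :
    ∀ init : List α, ls.foldl (fun t l => t ++ l) init = init ++ ls.flatten := by
  induction ls with
  | nil => simp
  | cons a t ih => intro init; simp [List.foldl, ih, List.append_assoc]

-- each pass appends one character to every string (alphabet is a singleton)
theorem pvPass_eq_map (xs : List String) : pvPass xs = xs.map (fun s => s ++ " ") := by
  unfold pvPass
  rw [pvFoldlApp]
  induction xs with
  | nil => rfl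
  | cons _ t ih => simpa [incrementBlockSize, pvAlphabet] using ih

theorem pvLastLen_pass (xs : List String) (h : xs ≠ []) :
    pvLastLen (pvPass xs) = pvLastLen xs + 1 := by
  rw [pvPass_eq_map]
  induction xs with
  | nil => exact absurd rfl h
  | cons a t ih =>
    cases t with
    | nil => simp [pvLastLen]
    | cons b t' => simpa [pvLastLen] using ih (by simp)

-- the while loop (the ≠ [] conjunct is a totality guard; Python never reaches an empty array)
def pvGrow (blockSize : Int) (xs : List String) : List String :=
  if h : ((pvLastLen xs : Int) < blockSize ∧ xs ≠ []) then
    pvGrow blockSize (pvPass xs)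
  else xs
termination_by (blockSize - (pvLastLen xs : Int)).toNat
decreasing_by
  have := pvLastLen_pass xs h.2
  omega

def dictByBlock (blockSize : Int) : List (String × Int) :=
  let sampleSpaceArray := pvAlphabet.foldl (fun r a => r ++ [a]) []
  let final := pvGrow blockSize sampleSpaceArray
  (final.foldl (fun d s => PySem.Dict.insert d s 0)
    (PySem.Dict.ofList [(" ", (0 : Int))])).items

-- ===== PORT B =====
def dictByBlock_alt (blockSize : Int) : List (String × Int) :=
  let L : Int := max 1 blockSize
  let key := (List.range (L - 1).toNat).foldl (fun k _ => k ++ " ") " "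
  (PySem.Dict.insert (PySem.Dict.insert (PySem.Dict.empty) " " 0) key 0).items

-- ===== PRECONDITION & SPEC =====
def Spec_dictByBlock (blockSize : Int) (out : List (String × Int)) : Prop := out = dictByBlock_alt blockSize
instance (blockSize : Int) (out : List (String × Int)) : Decidable (Spec_dictByBlock blockSize out) := by unfold Spec_dictByBlock; infer_instance

-- ===== CLAIM (what is proved, stated in full; the proofs are below) =====
def Claim_equal_dictByBlock : Prop := ∀ (blockSize : Int), Dom_dictByBlock blockSize → Spec_dictByBlock blockSize (dictByBlock blockSize)

-- ===== LEMMAS AND PROOFS =====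
theorem pvLastLen_single (s : String) : pvLastLen [s] = s.toList.length := by
  simp [pvLastLen]

theorem pvGrow_single (b : Int) :
    ∀ (n : Nat) (s : String), n = (b - (s.toList.length : Int)).toNat →
      pvGrow b [s] = [s ++ String.ofList (List.replicate n ' ')] := by
  intro n
  induction n with
  | zero =>
    intro s hn
    rw [pvGrow]
    have hcond : ¬ ((pvLastLen [s] : Int) < b ∧ ([s] : List String) ≠ []) := by
      rw [pvLastLen_single]
      omega
    rw [dif_neg hcond]
    have hs : s ++ String.ofList (List.replicate 0 ' ') = s := by
      rw [← String.toList_inj]; simp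
    rw [hs]
  | succ n ih =>
    intro s hn
    rw [pvGrow]
    have hcond : ((pvLastLen [s] : Int) < b ∧ ([s] : List String) ≠ []) := by
      refine ⟨?_, by simp⟩
      rw [pvLastLen_single]; omega
    rw [dif_pos hcond, pvPass_eq_map]
    simp only [List.map]
    have hlen : ((s ++ " ").toList.length : Int) = s.toList.length + 1 := by
      simp
    rw [ih (s ++ " ") (by omega)]
    have hs : s ++ " " ++ String.ofList (List.replicate n ' ')
        = s ++ String.ofList (List.replicate (n + 1) ' ') := by
      rw [← String.toList_inj]; simp [List.replicate_succ]
    rw [hs]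

-- B's accumulation loop in closed form
theorem pvAccum (n : Nat) (s : String) :
    (List.range n).foldl (fun k _ => k ++ " ") s = s ++ String.ofList (List.replicate n ' ') := by
  induction n with
  | zero => rw [← String.toList_inj]; simp
  | succ m ih =>
    rw [List.range_succ, List.foldl_append, ih]
    rw [← String.toList_inj]; simp [List.replicate_succ']

theorem dictByBlock_spec' (b : Int) : dictByBlock b = dictByBlock_alt b := by
  unfold dictByBlock dictByBlock_alt
  simp only [pvAlphabet, List.foldl, List.nil_append]
  rw [pvGrow_single b (b - 1).toNat " " (by simp)]
  simp only [List.foldl]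
  rw [pvAccum]
  have h1 : (max 1 b - 1).toNat = (b - 1).toNat := by omega
  rw [h1]
  rfl

-- ===== VERDICT (by name: the statement is the Claim_ definition above) =====
theorem dictByBlock_spec : Claim_equal_dictByBlock := by
  intro b _
  exact dictByBlock_spec' b
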